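-- pv_equiv track=rewrite | github.com/Konathalavenkat/Code-Daily | Leetcode/November_2024/Nov_21.py | countUnguarded
-- ===== SOURCE A (Python) =====
-- from typing import List
--
-- def countUnguarded(m: int, n: int, guards: List[List[int]], walls: List[List[int]]) -> int:
--     cells = [[0]*n for i in range(m)]
--     for i,j in walls:
--         cells[i][j]=2
--     for i,j in guards:
--         cells[i][j]=3
--     for i in range(m):
--         prevleft = False
--         prevright = False
--         for j in range(n):
--             if(cells[i][j]==2):
--                 prevleft=False
--             elif(cells[i][j]==3):
--                 prevleft = True
--             elif(prevleft):
--                 cells[i][j]=1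
--
--             if(cells[i][n-j-1]==2):
--                 prevright = False
--             elif(cells[i][n-j-1]==3):
--                 prevright = True
--             elif(prevright):
--                 cells[i][n-j-1]=1
--
--     for j in range(n):
--         prevtop = False
--         prevbottom = False
--         for i in range(m):
--             if(cells[i][j]==2):
--                 prevtop=False
--             elif(cells[i][j]==3):
--                 prevtop = True
--             elif(prevtop):
--                 cells[i][j]=1
--
--             if(cells[m-i-1][j]==2):
--                 prevbottom = False
--             elif(cells[m-i-1][j]==3):
--                 prevbottom = True
--             elif(prevbottom):
--                 cells[m-i-1][j]=1
--
--     res=0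
--     for i in range(m):
--         for j in range(n):
--             if(cells[i][j]==0):
--                 res+=1
--
--     return res
-- ===== SOURCE B (Python) =====
-- from typing import List
--
-- def countUnguarded(m: int, n: int, guards: List[List[int]], walls: List[List[int]]) -> int:
--     # Per-cell visibility test instead of A's four flag sweeps:
--     # a cell is guarded iff walking from it in some direction hits a guard before a wall.
--     cells = [[0] * n for _ in range(m)]
--     for i, j in walls:
--         cells[i][j] = 2
--     for i, j in guards:
--         cells[i][j] = 3
--
--     def seen(i: int, j: int) -> bool:
--         for di, dj in ((0, 1), (0, -1), (1, 0), (-1, 0)):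
--             x, y = i + di, j + dj
--             while 0 <= x < m and 0 <= y < n:
--                 c = cells[x][y]
--                 if c == 3:
--                     return True
--                 if c == 2:
--                     break
--                 x += di
--                 y += dj
--         return False
--
--     res = 0
--     for i in range(m):
--         for j in range(n):
--             if cells[i][j] == 0 and not seen(i, j):
--                 res += 1
--     return res
-- ===== Notes on version B (the rewrite author's own statement) =====
-- stated objective: alternative
-- what changed: A marks guarded cells with four interleaved flag sweeps over every row and column; B instead tests each empty cell directly by walking outward in the four directions until it hits a guard (guarded) or a wall/edge (not), then counts the cells that see no guard.
import Mathlib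
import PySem

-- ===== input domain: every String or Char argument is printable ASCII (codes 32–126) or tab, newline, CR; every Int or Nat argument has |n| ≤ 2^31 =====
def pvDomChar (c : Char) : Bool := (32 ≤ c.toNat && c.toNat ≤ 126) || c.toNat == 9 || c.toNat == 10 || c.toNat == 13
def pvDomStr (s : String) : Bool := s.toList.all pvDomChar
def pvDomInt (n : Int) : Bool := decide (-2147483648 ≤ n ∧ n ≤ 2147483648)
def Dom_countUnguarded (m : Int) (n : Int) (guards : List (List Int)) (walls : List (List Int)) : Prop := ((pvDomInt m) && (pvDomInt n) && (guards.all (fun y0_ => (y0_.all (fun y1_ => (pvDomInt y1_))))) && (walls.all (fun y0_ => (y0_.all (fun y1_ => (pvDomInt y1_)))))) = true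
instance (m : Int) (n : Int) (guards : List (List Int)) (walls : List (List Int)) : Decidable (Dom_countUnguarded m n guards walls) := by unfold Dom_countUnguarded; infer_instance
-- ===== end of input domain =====

-- B replaces A's four interleaved flag sweeps by a per-cell ray walk in the four directions
-- (objective: alternative algorithm, same exact counts; no speed claim).

-- ===== PORT A =====
-- cells[i][j] read (indices used by A are always 0-based in range here)
def pvGGet (g : List (List Int)) (i j : Int) : Int :=
  (g.getD i.toNat []).getD j.toNat 0

-- cells[i][j] = v  (Python list assignment, with Python's negative-index wrap)
def pvGSet (g : List (List Int)) (i j v : Int) : List (List Int) :=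
  g.modify (if i < 0 then i + g.length else i).toNat
    (fun row => row.set (if j < 0 then j + row.length else j).toNat v)

-- the grid-building lines shared verbatim by A and B:
-- cells = [[0]*n ...]; walls→2; guards→3
def pvBuild (m n : Int) (guards walls : List (List Int)) : List (List Int) :=
  let cells := (PySem.List.pyRange 0 m).map (fun _ => List.replicate n.toNat 0)
  let cells := walls.foldl (fun g p => pvGSet g (p.getD 0 0) (p.getD 1 0) 2) cells
  guards.foldl (fun g p => pvGSet g (p.getD 0 0) (p.getD 1 0) 3) cells

-- body of A's row loop over j (left flag at j, right flag at n-j-1)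
def pvRowStepA (n i : Int) (st : List (List Int) × Bool × Bool) (j : Int) :
    List (List Int) × Bool × Bool :=
  let lp := if pvGGet st.1 i j = 2 then (st.1, false)
            else if pvGGet st.1 i j = 3 then (st.1, true)
            else if st.2.1 then (pvGSet st.1 i j 1, st.2.1) else (st.1, st.2.1)
  let rp := if pvGGet lp.1 i (n - j - 1) = 2 then (lp.1, false)
            else if pvGGet lp.1 i (n - j - 1) = 3 then (lp.1, true)
            else if st.2.2 then (pvGSet lp.1 i (n - j - 1) 1, st.2.2) else (lp.1, st.2.2)
  (rp.1, lp.2, rp.2)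

-- body of A's column loop over i (top flag at i, bottom flag at m-i-1)
def pvColStepA (m j : Int) (st : List (List Int) × Bool × Bool) (i : Int) :
    List (List Int) × Bool × Bool :=
  let lp := if pvGGet st.1 i j = 2 then (st.1, false)
            else if pvGGet st.1 i j = 3 then (st.1, true)
            else if st.2.1 then (pvGSet st.1 i j 1, st.2.1) else (st.1, st.2.1)
  let rp := if pvGGet lp.1 (m - i - 1) j = 2 then (lp.1, false)
            else if pvGGet lp.1 (m - i - 1) j = 3 then (lp.1, true)
            else if st.2.2 then (pvGSet lp.1 (m - i - 1) j 1, st.2.2) else (lp.1, st.2.2)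
  (rp.1, lp.2, rp.2)

def countUnguarded (m : Int) (n : Int) (guards : List (List Int)) (walls : List (List Int)) : Int :=
  let cells := pvBuild m n guards walls
  let cells := (PySem.List.pyRange 0 m).foldl
    (fun g i => ((PySem.List.pyRange 0 n).foldl (pvRowStepA n i) (g, false, false)).1) cells
  let cells := (PySem.List.pyRange 0 n).foldl
    (fun g j => ((PySem.List.pyRange 0 m).foldl (pvColStepA m j) (g, false, false)).1) cells
  (PySem.List.pyRange 0 m).foldl (fun res i =>
    (PySem.List.pyRange 0 n).foldl (fun res j =>
      if pvGGet cells i j = 0 then res + 1 else res) res) 0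

-- ===== PORT B =====
-- B's while loop walking from (x,y) in direction (dx,dy); fuel ≥ number of steps the
-- walk can take before leaving the grid (supplied as (m+n).toNat at the call sites)
def pvRay (g : List (List Int)) (m n : Int) : Nat → Int → Int → Int → Int → Bool
  | 0, _, _, _, _ => false
  | fuel+1, x, y, dx, dy =>
    if 0 ≤ x ∧ x < m ∧ 0 ≤ y ∧ y < n then
      if pvGGet g x y = 3 then true
      else if pvGGet g x y = 2 then false
      else pvRay g m n fuel (x + dx) (y + dy) dx dy
    else false

-- B's seen(i, j): the four directions in B's order, short-circuited like Python's `for`+return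
def pvSeen (g : List (List Int)) (m n i j : Int) : Bool :=
  pvRay g m n (m + n).toNat i (j + 1) 0 1 ||
  pvRay g m n (m + n).toNat i (j - 1) 0 (-1) ||
  pvRay g m n (m + n).toNat (i + 1) j 1 0 ||
  pvRay g m n (m + n).toNat (i - 1) j (-1) 0

def countUnguarded_alt (m : Int) (n : Int) (guards : List (List Int)) (walls : List (List Int)) : Int :=
  let cells := pvBuild m n guards walls
  (PySem.List.pyRange 0 m).foldl (fun res i =>
    (PySem.List.pyRange 0 n).foldl (fun res j =>
      if pvGGet cells i j = 0 ∧ pvSeen cells m n i j = false then res + 1 else res) res) 0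

-- ===== PRECONDITION & SPEC =====
-- Pre_ = exactly the inputs on which Python A returns normally: every guard/wall entry is a
-- 2-element list whose coordinates are valid Python indices (negative wrap included);
-- elsewhere A raises (ValueError on unpacking, IndexError on assignment).
def Pre_countUnguarded (m : Int) (n : Int) (guards : List (List Int)) (walls : List (List Int)) : Prop :=
  ∀ p ∈ guards ++ walls,
    p.length = 2 ∧ -m ≤ p.getD 0 0 ∧ p.getD 0 0 < m ∧ -n ≤ p.getD 1 0 ∧ p.getD 1 0 < n
instance (m : Int) (n : Int) (guards : List (List Int)) (walls : List (List Int)) : Decidable (Pre_countUnguarded m n guards walls) := by unfold Pre_countUnguarded; infer_instance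

def pvWitness_countUnguarded : Int × Int × List (List Int) × List (List Int) :=
  (4, 3, [[1, 1], [-1, 0]], [[2, 2]])

def Spec_countUnguarded (m : Int) (n : Int) (guards : List (List Int)) (walls : List (List Int)) (out : Int) : Prop := out = countUnguarded_alt m n guards walls
instance (m : Int) (n : Int) (guards : List (List Int)) (walls : List (List Int)) (out : Int) : Decidable (Spec_countUnguarded m n guards walls out) := by unfold Spec_countUnguarded; infer_instance

-- ===== CLAIM (what is proved, stated in full; the proofs are below) =====
def Claim_equal_countUnguarded : Prop := ∀ (m : Int) (n : Int) (guards : List (List Int)) (walls : List (List Int)), Dom_countUnguarded m n guards walls → Pre_countUnguarded m n guards walls → Spec_countUnguarded m n guards walls (countUnguarded m n guards walls)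

-- ===== LEMMAS AND PROOFS =====

-- ---- line-scan predicates: "first wall-or-guard met is a guard" ----
-- scanning upward from x, fuel many cells
def pvFwdGo (v : Int → Int) : Nat → Int → Bool
  | 0, _ => false
  | f+1, x => if v x = 2 then false else if v x = 3 then true else pvFwdGo v f (x + 1)

-- scanning downward from x, fuel many cells
def pvBwdGo (v : Int → Int) : Nat → Int → Bool
  | 0, _ => false
  | f+1, x => if v x = 2 then false else if v x = 3 then true else pvBwdGo v f (x - 1)

def pvFwd (v : Int → Int) (lo hi : Int) : Bool := pvFwdGo v (hi - lo).toNat lo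
def pvBwd (v : Int → Int) (lo hi : Int) : Bool := pvBwdGo v (hi - lo).toNat (hi - 1)

lemma pvFwd_nil (v : Int → Int) (lo hi : Int) (h : hi ≤ lo) : pvFwd v lo hi = false := by
  unfold pvFwd
  have : (hi - lo).toNat = 0 := by omega
  rw [this]; rfl

lemma pvBwd_nil (v : Int → Int) (lo hi : Int) (h : hi ≤ lo) : pvBwd v lo hi = false := by
  unfold pvBwd
  have : (hi - lo).toNat = 0 := by omega
  rw [this]; rfl

lemma pvFwd_cons (v : Int → Int) (lo hi : Int) (h : lo < hi) :
    pvFwd v lo hi = if v lo = 2 then false else if v lo = 3 then true else pvFwd v (lo + 1) hi := by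
  unfold pvFwd
  have h1 : (hi - lo).toNat = (hi - (lo + 1)).toNat + 1 := by omega
  rw [h1]; rfl

lemma pvBwd_peel (v : Int → Int) (lo hi : Int) (h : lo < hi) :
    pvBwd v lo hi = if v (hi - 1) = 2 then false else if v (hi - 1) = 3 then true
                    else pvBwd v lo (hi - 1) := by
  unfold pvBwd
  have h1 : (hi - lo).toNat = (hi - 1 - lo).toNat + 1 := by omega
  rw [h1]; simp [pvBwdGo]

lemma pvFwdGo_congr (v w : Int → Int) (f : Nat) (x : Int)
    (h : ∀ t, x ≤ t → t < x + f → (v t = 2 ↔ w t = 2) ∧ (v t = 3 ↔ w t = 3)) :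
    pvFwdGo v f x = pvFwdGo w f x := by
  induction f generalizing x with
  | zero => rfl
  | succ f ih =>
    have hx := h x (le_refl x) (by omega)
    simp only [pvFwdGo]
    by_cases h2 : v x = 2
    · rw [if_pos h2, if_pos (hx.1.mp h2)]
    · rw [if_neg h2, if_neg (fun hw => h2 (hx.1.mpr hw))]
      by_cases h3 : v x = 3
      · rw [if_pos h3, if_pos (hx.2.mp h3)]
      · rw [if_neg h3, if_neg (fun hw => h3 (hx.2.mpr hw))]
        exact ih (x + 1) (fun t h1 h2 => h t (by omega) (by omega))

lemma pvBwdGo_congr (v w : Int → Int) (f : Nat) (x : Int)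
    (h : ∀ t, x - f < t → t ≤ x → (v t = 2 ↔ w t = 2) ∧ (v t = 3 ↔ w t = 3)) :
    pvBwdGo v f x = pvBwdGo w f x := by
  induction f generalizing x with
  | zero => rfl
  | succ f ih =>
    have hx := h x (by omega) (le_refl x)
    simp only [pvBwdGo]
    by_cases h2 : v x = 2
    · rw [if_pos h2, if_pos (hx.1.mp h2)]
    · rw [if_neg h2, if_neg (fun hw => h2 (hx.1.mpr hw))]
      by_cases h3 : v x = 3
      · rw [if_pos h3, if_pos (hx.2.mp h3)]
      · rw [if_neg h3, if_neg (fun hw => h3 (hx.2.mpr hw))]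
        exact ih (x - 1) (fun t h1 h2 => h t (by omega) (by omega))

lemma pvFwd_congr (v w : Int → Int) (lo hi : Int)
    (h : ∀ t, lo ≤ t → t < hi → (v t = 2 ↔ w t = 2) ∧ (v t = 3 ↔ w t = 3)) :
    pvFwd v lo hi = pvFwd w lo hi := by
  unfold pvFwd
  exact pvFwdGo_congr v w _ lo (fun t h1 h2 => h t h1 (by omega))

lemma pvBwd_congr (v w : Int → Int) (lo hi : Int)
    (h : ∀ t, lo ≤ t → t < hi → (v t = 2 ↔ w t = 2) ∧ (v t = 3 ↔ w t = 3)) :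
    pvBwd v lo hi = pvBwd w lo hi := by
  unfold pvBwd
  exact pvBwdGo_congr v w _ (hi - 1) (fun t h1 h2 => h t (by omega) (by omega))

-- ---- grid shape and get/set lemmas ----
def pvShape (m n : Int) (g : List (List Int)) : Prop :=
  g.length = m.toNat ∧ ∀ r ∈ g, r.length = n.toNat

lemma pvShape_gset (m n i j v : Int) (g : List (List Int)) (h : pvShape m n g) :
    pvShape m n (pvGSet g i j v) := by
  obtain ⟨h1, h2⟩ := h
  refine ⟨by simpa [pvGSet] using h1, ?_⟩
  intro r hr
  rw [pvGSet, List.mem_iff_getElem?] at hr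
  obtain ⟨k, hk⟩ := hr
  rw [List.getElem?_modify] at hk
  cases hg : g[k]? with
  | none => rw [hg] at hk; simp at hk
  | some row =>
    rw [hg] at hk
    have hrow : row ∈ g := List.mem_of_getElem? hg
    have := h2 row hrow
    simp at hk
    by_cases he : (if i < 0 then i + ↑g.length else i).toNat = k
    · rw [if_pos he] at hk; rw [← hk]; simpa using this
    · rw [if_neg he] at hk; rw [← hk]; exact this

lemma pvShape_foldl_gset (m n : Int) (c : Int) (l : List (List Int))
    (g : List (List Int)) (h : pvShape m n g) :
    pvShape m n (l.foldl (fun g p => pvGSet g (p.getD 0 0) (p.getD 1 0) c) g) := by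
  induction l generalizing g with
  | nil => exact h
  | cons p l ih => exact ih _ (pvShape_gset _ _ _ _ _ _ h)

lemma pvShape_build (m n : Int) (guards walls : List (List Int)) :
    pvShape m n (pvBuild m n guards walls) := by
  unfold pvBuild
  apply pvShape_foldl_gset
  apply pvShape_foldl_gset
  constructor
  · rw [List.length_map, PySem.List.length_pyRange_one]; omega
  · intro r hr
    simp only [List.mem_map] at hr
    obtain ⟨x, _, hx⟩ := hr
    simp [← hx]

lemma pvGGet_gset (m n i t w a b : Int) (g : List (List Int)) (h : pvShape m n g)
    (hi : 0 ≤ i) (him : i < m) (ht : 0 ≤ t) (htn : t < n) (ha : 0 ≤ a) (hb : 0 ≤ b) :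
    pvGGet (pvGSet g i t w) a b = if a = i ∧ b = t then w else pvGGet g a b := by
  obtain ⟨h1, h2⟩ := h
  have hnneg : ¬ i < 0 := by omega
  have htneg : ¬ t < 0 := by omega
  unfold pvGGet pvGSet
  rw [if_neg hnneg]
  simp only [List.getD_eq_getElem?_getD]
  by_cases hai : a = i
  · subst hai
    have hlt : a.toNat < g.length := by omega
    obtain ⟨r, hr⟩ : ∃ r, g[a.toNat]? = some r :=
      ⟨g[a.toNat], List.getElem?_eq_getElem hlt⟩
    have hrlen : r.length = n.toNat := h2 r (List.mem_of_getElem? hr)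
    have hmod : (g.modify a.toNat
        (fun row => row.set (if t < 0 then t + ↑row.length else t).toNat w))[a.toNat]?
        = some (r.set (if t < 0 then t + ↑r.length else t).toNat w) := by
      rw [List.getElem?_modify, hr]; simp
    rw [hmod, hr]
    simp only [Option.getD_some]
    rw [if_neg htneg, List.getElem?_set]
    by_cases hbt : b = t
    · subst hbt
      rw [if_pos (by omega)]
      rw [if_pos (by omega : b.toNat < r.length), if_pos ⟨trivial, rfl⟩]
      rfl
    · rw [if_neg (by omega), if_neg (by tauto)]
  · have hne : ¬ i.toNat = a.toNat := by omega
    rw [List.getElem?_modify_ne _ _ hne, if_neg (by tauto)]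

-- ===== the sweep: abstract interleaved two-flag pass over a line =====
def pvGridN (m n : Int) : Type := {g : List (List Int) // pvShape m n g}

def pvSweepStep {γ : Type} (rd : γ → Int → Int) (wr : γ → Int → γ) (n : Int)
    (st : γ × Bool × Bool) (j : Int) : γ × Bool × Bool :=
  let lp := if rd st.1 j = 2 then (st.1, false)
            else if rd st.1 j = 3 then (st.1, true)
            else if st.2.1 then (wr st.1 j, st.2.1) else (st.1, st.2.1)
  let rp := if rd lp.1 (n - j - 1) = 2 then (lp.1, false)
            else if rd lp.1 (n - j - 1) = 3 then (lp.1, true)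
            else if st.2.2 then (wr lp.1 (n - j - 1), st.2.2) else (lp.1, st.2.2)
  (rp.1, lp.2, rp.2)

-- value of the line after the first j loop iterations, in terms of the original line v
def pvXval (v : Int → Int) (n j t : Int) : Int :=
  if v t = 2 ∨ v t = 3 then v t
  else if (0 ≤ t ∧ t < j ∧ pvBwd v 0 t = true) ∨ (n - j ≤ t ∧ t < n ∧ pvFwd v (t + 1) n = true)
       then 1 else v t

-- one flag/one cell half of pvSweepStep
def pvHalf {γ : Type} (rd : γ → Int → Int) (wr : γ → Int → γ) (s : γ) (q : Int) (fl : Bool) :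
    γ × Bool :=
  if rd s q = 2 then (s, false) else if rd s q = 3 then (s, true)
  else if fl then (wr s q, fl) else (s, fl)

lemma pvSweepStep_eq {γ : Type} (rd : γ → Int → Int) (wr : γ → Int → γ) (n : Int)
    (st : γ × Bool × Bool) (j : Int) :
    pvSweepStep rd wr n st j =
      ((pvHalf rd wr (pvHalf rd wr st.1 j st.2.1).1 (n - j - 1) st.2.2).1,
       (pvHalf rd wr st.1 j st.2.1).2,
       (pvHalf rd wr (pvHalf rd wr st.1 j st.2.1).1 (n - j - 1) st.2.2).2) := rfl

lemma pvHalf_snd {γ : Type} (rd : γ → Int → Int) (wr : γ → Int → γ) (s : γ) (q : Int) (fl : Bool) :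
    (pvHalf rd wr s q fl).2 = (if rd s q = 2 then false else if rd s q = 3 then true else fl) := by
  unfold pvHalf; split_ifs <;> rfl

lemma pvHalf_read {γ : Type} (rd : γ → Int → Int) (wr : γ → Int → γ) (n : Int)
    (hwr : ∀ s t t', 0 ≤ t → t < n → 0 ≤ t' →
      rd (wr s t) t' = if t' = t then 1 else rd s t')
    (s : γ) (q : Int) (fl : Bool) (hq : 0 ≤ q) (hqn : q < n) (t : Int) (ht : 0 ≤ t) :
    rd (pvHalf rd wr s q fl).1 t =
      if rd s q ≠ 2 ∧ rd s q ≠ 3 ∧ fl = true ∧ t = q then 1 else rd s t := by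
  unfold pvHalf
  by_cases h2 : rd s q = 2
  · simp [h2]
  by_cases h3 : rd s q = 3
  · simp [h3]
  cases fl with
  | false => simp [h2, h3]
  | true =>
    rw [if_neg h2, if_neg h3, if_pos rfl]
    rw [hwr s q t hq hqn ht]
    by_cases htq : t = q
    · rw [if_pos htq, if_pos ⟨h2, h3, rfl, htq⟩]
    · rw [if_neg htq, if_neg (by tauto)]

lemma pvHalf_rho {γ α : Type} (rd : γ → Int → Int) (wr : γ → Int → γ) (ρ : γ → α) (n : Int)
    (hρ : ∀ s t, 0 ≤ t → t < n → ρ (wr s t) = ρ s)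
    (s : γ) (q : Int) (fl : Bool) (hq : 0 ≤ q) (hqn : q < n) :
    ρ (pvHalf rd wr s q fl).1 = ρ s := by
  unfold pvHalf
  split_ifs <;> first | rfl | exact hρ s q hq hqn

-- the `elif`-reachable values are never walls/guards
lemma pvXval_special (v : Int → Int) (n j t : Int) :
    (pvXval v n j t = 2 ↔ v t = 2) ∧ (pvXval v n j t = 3 ↔ v t = 3) := by
  unfold pvXval
  split_ifs with h1 h2
  · exact ⟨Iff.rfl, Iff.rfl⟩
  · constructor <;> constructor <;> intro h <;> omega
  · exact ⟨Iff.rfl, Iff.rfl⟩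

lemma pvBwd_step (v : Int → Int) (k : Int) (hk0 : 0 ≤ k) :
    (if v k = 2 then false else if v k = 3 then true else pvBwd v 0 k) = pvBwd v 0 (k + 1) := by
  conv_rhs => rw [pvBwd_peel v 0 (k + 1) (by omega)]
  rw [show k + 1 - 1 = k by ring]

lemma pvFwd_step (v : Int → Int) (n k : Int) (hk0 : 0 ≤ k) (_hkn : k < n) :
    (if v (n - k - 1) = 2 then false else if v (n - k - 1) = 3 then true
     else pvFwd v (n - k) n) = pvFwd v (n - (k + 1)) n := by
  conv_rhs => rw [pvFwd_cons v (n - (k + 1)) n (by omega)]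
  rw [show n - (k + 1) + 1 = n - k by ring, show n - (k + 1) = n - k - 1 by ring]

lemma pvXval_step (v : Int → Int) (n k t : Int) (hk0 : 0 ≤ k) (hkn : k < n) (ht : 0 ≤ t) :
    (if v (n - k - 1) ≠ 2 ∧ v (n - k - 1) ≠ 3 ∧ pvFwd v (n - k) n = true ∧ t = n - k - 1
     then (1 : Int)
     else if v k ≠ 2 ∧ v k ≠ 3 ∧ pvBwd v 0 k = true ∧ t = k then 1
     else pvXval v n k t) = pvXval v n (k + 1) t := by
  unfold pvXval
  by_cases hsp : v t = 2 ∨ v t = 3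
  · simp only [if_pos hsp]
    have hnC2 : ¬(v (n - k - 1) ≠ 2 ∧ v (n - k - 1) ≠ 3 ∧ pvFwd v (n - k) n = true
        ∧ t = n - k - 1) := by rintro ⟨a, b, _, rfl⟩; tauto
    have hnC1 : ¬(v k ≠ 2 ∧ v k ≠ 3 ∧ pvBwd v 0 k = true ∧ t = k) := by
      rintro ⟨a, b, _, rfl⟩; tauto
    rw [if_neg hnC2, if_neg hnC1]
  · have hs1 : v t ≠ 2 := fun h => hsp (Or.inl h)
    have hs2 : v t ≠ 3 := fun h => hsp (Or.inr h)
    simp only [if_neg hsp]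
    by_cases hNew : (0 ≤ t ∧ t < k + 1 ∧ pvBwd v 0 t = true) ∨
        (n - (k + 1) ≤ t ∧ t < n ∧ pvFwd v (t + 1) n = true)
    · simp only [if_pos hNew]
      have hdisj : (v (n - k - 1) ≠ 2 ∧ v (n - k - 1) ≠ 3 ∧ pvFwd v (n - k) n = true
            ∧ t = n - k - 1)
          ∨ (v k ≠ 2 ∧ v k ≠ 3 ∧ pvBwd v 0 k = true ∧ t = k)
          ∨ ((0 ≤ t ∧ t < k ∧ pvBwd v 0 t = true) ∨
             (n - k ≤ t ∧ t < n ∧ pvFwd v (t + 1) n = true)) := by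
        rcases hNew with ⟨h0, hlt, hbwd⟩ | ⟨hge, hlt, hfwd⟩
        · by_cases htk : t = k
          · subst htk
            exact Or.inr (Or.inl ⟨hs1, hs2, hbwd, rfl⟩)
          · exact Or.inr (Or.inr (Or.inl ⟨h0, by omega, hbwd⟩))
        · by_cases htp : t = n - k - 1
          · subst htp
            rw [show n - k - 1 + 1 = n - k by ring] at hfwd
            exact Or.inl ⟨hs1, hs2, hfwd, rfl⟩
          · exact Or.inr (Or.inr (Or.inr ⟨by omega, hlt, hfwd⟩))
      rcases hdisj with hC | hC | hC
      · rw [if_pos hC]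
      · by_cases a : v (n - k - 1) ≠ 2 ∧ v (n - k - 1) ≠ 3 ∧ pvFwd v (n - k) n = true
            ∧ t = n - k - 1
        · rw [if_pos a]
        · rw [if_neg a, if_pos hC]
      · by_cases a : v (n - k - 1) ≠ 2 ∧ v (n - k - 1) ≠ 3 ∧ pvFwd v (n - k) n = true
            ∧ t = n - k - 1
        · rw [if_pos a]
        · by_cases b : v k ≠ 2 ∧ v k ≠ 3 ∧ pvBwd v 0 k = true ∧ t = k
          · rw [if_neg a, if_pos b]
          · rw [if_neg a, if_neg b, if_pos hC]
    · simp only [if_neg hNew]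
      have hnC2 : ¬(v (n - k - 1) ≠ 2 ∧ v (n - k - 1) ≠ 3 ∧ pvFwd v (n - k) n = true
          ∧ t = n - k - 1) := by
        rintro ⟨a, b, hfw, rfl⟩
        refine hNew (Or.inr ⟨by omega, by omega, ?_⟩)
        rw [show n - k - 1 + 1 = n - k by ring]; exact hfw
      have hnC1 : ¬(v k ≠ 2 ∧ v k ≠ 3 ∧ pvBwd v 0 k = true ∧ t = k) := by
        rintro ⟨a, b, hbw, rfl⟩
        exact hNew (Or.inl ⟨hk0, by omega, hbw⟩)
      have hnOld : ¬((0 ≤ t ∧ t < k ∧ pvBwd v 0 t = true) ∨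
          (n - k ≤ t ∧ t < n ∧ pvFwd v (t + 1) n = true)) := by
        rintro (⟨h0, hlt, hbwd⟩ | ⟨hge, hlt, hfwd⟩)
        · exact hNew (Or.inl ⟨h0, by omega, hbwd⟩)
        · exact hNew (Or.inr ⟨by omega, hlt, hfwd⟩)
      rw [if_neg hnC2, if_neg hnC1, if_neg hnOld]

lemma pvSweep_inv {γ α : Type} (rd : γ → Int → Int) (wr : γ → Int → γ) (ρ : γ → α)
    (n : Int) (s0 : γ)
    (hwr : ∀ s t t', 0 ≤ t → t < n → 0 ≤ t' →
      rd (wr s t) t' = if t' = t then 1 else rd s t')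
    (hρ : ∀ s t, 0 ≤ t → t < n → ρ (wr s t) = ρ s)
    (k : Nat) (hk : (k : Int) ≤ n) :
    ∃ s, (PySem.List.pyRange 0 k).foldl (pvSweepStep rd wr n) (s0, false, false)
          = (s, pvBwd (rd s0) 0 k, pvFwd (rd s0) (n - k) n)
       ∧ (∀ t, 0 ≤ t → rd s t = pvXval (rd s0) n k t) ∧ ρ s = ρ s0 := by
  induction k with
  | zero =>
    refine ⟨s0, ?_, ?_, rfl⟩
    · rw [Nat.cast_zero, PySem.List.pyRange_one_eq_nil (le_refl 0), List.foldl_nil,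
          pvBwd_nil _ _ _ (le_refl 0), pvFwd_nil _ _ _ (by omega)]
    · intro t ht
      rw [Nat.cast_zero]
      unfold pvXval
      split_ifs with h1 h2
      · rfl
      · exfalso; rcases h2 with ⟨_, h, _⟩ | ⟨h, h', _⟩ <;> omega
      · rfl
  | succ k ih =>
    have hk' : (k : Int) ≤ n := by push_cast at hk ⊢; omega
    obtain ⟨s, hfold, hread, hrho⟩ := ih hk'
    have hk0 : (0 : Int) ≤ (k : Int) := Int.natCast_nonneg k
    have hkn : (k : Int) < n := by push_cast at hk; omega
    have hp0 : (0 : Int) ≤ n - (k : Int) - 1 := by omega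
    have hpn : n - (k : Int) - 1 < n := by omega
    have hcast : (((k + 1 : Nat)) : Int) = (k : Int) + 1 := by push_cast; ring
    rw [hcast, PySem.List.pyRange_one_succ_right (by omega), List.foldl_append, hfold,
        List.foldl_cons, List.foldl_nil, pvSweepStep_eq]
    dsimp only
    have hXk := hread (k : Int) hk0
    have hXp := hread (n - (k : Int) - 1) hp0
    have hk2 : (rd s (k : Int) = 2) ↔ rd s0 (k : Int) = 2 := by
      rw [hXk]; exact (pvXval_special _ n _ _).1
    have hk3 : (rd s (k : Int) = 3) ↔ rd s0 (k : Int) = 3 := by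
      rw [hXk]; exact (pvXval_special _ n _ _).2
    have hLp : rd (pvHalf rd wr s (k : Int) (pvBwd (rd s0) 0 (k : Int))).1 (n - (k : Int) - 1) =
        if rd s (k : Int) ≠ 2 ∧ rd s (k : Int) ≠ 3 ∧ pvBwd (rd s0) 0 (k : Int) = true
            ∧ n - (k : Int) - 1 = (k : Int) then 1
        else rd s (n - (k : Int) - 1) :=
      pvHalf_read rd wr n hwr s (k : Int) _ hk0 hkn _ hp0
    have hp2 : (rd (pvHalf rd wr s (k : Int) (pvBwd (rd s0) 0 (k : Int))).1 (n - (k : Int) - 1) = 2)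
        ↔ rd s0 (n - (k : Int) - 1) = 2 := by
      rw [hLp]
      by_cases hC : rd s (k : Int) ≠ 2 ∧ rd s (k : Int) ≠ 3 ∧ pvBwd (rd s0) 0 (k : Int) = true
          ∧ n - (k : Int) - 1 = (k : Int)
      · rw [if_pos hC]
        have hne : rd s0 (n - (k : Int) - 1) ≠ 2 := by
          rw [hC.2.2.2]; exact fun h => hC.1 (hk2.mpr h)
        exact iff_of_false (by norm_num) hne
      · rw [if_neg hC, hXp]; exact (pvXval_special _ n _ _).1
    have hp3 : (rd (pvHalf rd wr s (k : Int) (pvBwd (rd s0) 0 (k : Int))).1 (n - (k : Int) - 1) = 3)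
        ↔ rd s0 (n - (k : Int) - 1) = 3 := by
      rw [hLp]
      by_cases hC : rd s (k : Int) ≠ 2 ∧ rd s (k : Int) ≠ 3 ∧ pvBwd (rd s0) 0 (k : Int) = true
          ∧ n - (k : Int) - 1 = (k : Int)
      · rw [if_pos hC]
        have hne : rd s0 (n - (k : Int) - 1) ≠ 3 := by
          rw [hC.2.2.2]; exact fun h => hC.2.1 (hk3.mpr h)
        exact iff_of_false (by norm_num) hne
      · rw [if_neg hC, hXp]; exact (pvXval_special _ n _ _).2
    refine ⟨(pvHalf rd wr (pvHalf rd wr s (k : Int) (pvBwd (rd s0) 0 (k : Int))).1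
        (n - (k : Int) - 1) (pvFwd (rd s0) (n - (k : Int)) n)).1, ?_, ?_, ?_⟩
    · have e1 : (pvHalf rd wr s (k : Int) (pvBwd (rd s0) 0 (k : Int))).2
          = pvBwd (rd s0) 0 ((k : Int) + 1) := by
        rw [pvHalf_snd]
        simp only [hk2, hk3]
        exact pvBwd_step (rd s0) (k : Int) hk0
      have e2 : (pvHalf rd wr (pvHalf rd wr s (k : Int) (pvBwd (rd s0) 0 (k : Int))).1
            (n - (k : Int) - 1) (pvFwd (rd s0) (n - (k : Int)) n)).2
          = pvFwd (rd s0) (n - ((k : Int) + 1)) n := by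
        rw [pvHalf_snd]
        simp only [hp2, hp3]
        exact pvFwd_step (rd s0) n (k : Int) hk0 hkn
      rw [e1, e2]
    · intro t ht
      rw [pvHalf_read rd wr n hwr _ (n - (k : Int) - 1) _ hp0 hpn t ht,
          pvHalf_read rd wr n hwr s (k : Int) _ hk0 hkn t ht]
      simp only [not_congr hp2, not_congr hp3, not_congr hk2, not_congr hk3, hread t ht]
      exact pvXval_step (rd s0) n (k : Int) t hk0 hkn ht
    · rw [pvHalf_rho rd wr ρ n hρ _ (n - (k : Int) - 1) _ hp0 hpn,
          pvHalf_rho rd wr ρ n hρ s (k : Int) _ hk0 hkn, hrho]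

lemma pvXval_congr (v w : Int → Int) (n j t : Int) (ht : 0 ≤ t)
    (h : ∀ s, 0 ≤ s → v s = w s) : pvXval v n j t = pvXval w n j t := by
  unfold pvXval
  have hb : pvBwd v 0 t = pvBwd w 0 t :=
    pvBwd_congr v w 0 t (fun s h1 h2 => by constructor <;> rw [h s h1])
  have hf : pvFwd v (t + 1) n = pvFwd w (t + 1) n :=
    pvFwd_congr v w (t + 1) n (fun s h1 h2 => by constructor <;> rw [h s (by omega)])
  rw [h t ht, hb, hf]

lemma pvXval_deg (v : Int → Int) (n t : Int) (hn : n ≤ 0) (ht : 0 ≤ t) :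
    pvXval v n n t = v t := by
  unfold pvXval
  split_ifs with h1 h2
  · rfl
  · exfalso; rcases h2 with ⟨_, h, _⟩ | ⟨_, h, _⟩ <;> omega
  · rfl

-- ===== the two phases of A =====
-- the line after A's row phase: row a of the grid, sweep applied if the row exists
def pvRow1 (G : List (List Int)) (m n a b : Int) : Int :=
  if 0 ≤ a ∧ a < m then pvXval (fun t => pvGGet G a t) n n b else pvGGet G a b

def pvRdRow (m n i : Int) (s : pvGridN m n) (t : Int) : Int := pvGGet s.val i t

def pvWrRow (m n i : Int) (s : pvGridN m n) (t : Int) : pvGridN m n :=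
  ⟨pvGSet s.val i t 1, pvShape_gset m n i t 1 s.val s.property⟩

lemma pvRowBridge (m n i : Int) (l : List Int) (st : pvGridN m n × Bool × Bool) :
    ((l.foldl (pvSweepStep (pvRdRow m n i) (pvWrRow m n i) n) st).1.val,
     (l.foldl (pvSweepStep (pvRdRow m n i) (pvWrRow m n i) n) st).2)
      = l.foldl (pvRowStepA n i) (st.1.val, st.2) := by
  induction l generalizing st with
  | nil => rfl
  | cons x l ihl =>
    have hinner : ∀ (s : pvGridN m n) (q : Int) (fl : Bool),
        ((pvHalf (pvRdRow m n i) (pvWrRow m n i) s q fl).1.val,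
         (pvHalf (pvRdRow m n i) (pvWrRow m n i) s q fl).2)
        = (if pvGGet s.val i q = 2 then (s.val, false)
           else if pvGGet s.val i q = 3 then (s.val, true)
           else if fl then (pvGSet s.val i q 1, fl) else (s.val, fl)) := by
      intro s q fl
      unfold pvHalf pvRdRow pvWrRow
      split_ifs <;> rfl
    have hstep : ((pvSweepStep (pvRdRow m n i) (pvWrRow m n i) n st x).1.val,
        (pvSweepStep (pvRdRow m n i) (pvWrRow m n i) n st x).2)
        = pvRowStepA n i (st.1.val, st.2) x := by
      obtain ⟨s, pl, pr⟩ := st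
      rw [pvSweepStep_eq]
      unfold pvRowStepA
      dsimp only
      rw [← hinner s x pl]
      dsimp only
      rw [← hinner (pvHalf (pvRdRow m n i) (pvWrRow m n i) s x pl).1 (n - x - 1) pr]
    rw [List.foldl_cons, List.foldl_cons,
        ihl (pvSweepStep (pvRdRow m n i) (pvWrRow m n i) n st x), hstep]

lemma pvRowPhase (m n : Int) (G : List (List Int)) (hG : pvShape m n G) :
    pvShape m n ((PySem.List.pyRange 0 m).foldl
      (fun g i => ((PySem.List.pyRange 0 n).foldl (pvRowStepA n i) (g, false, false)).1) G)
    ∧ ∀ a b, 0 ≤ a → 0 ≤ b →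
      pvGGet ((PySem.List.pyRange 0 m).foldl
        (fun g i => ((PySem.List.pyRange 0 n).foldl (pvRowStepA n i) (g, false, false)).1) G) a b
      = pvRow1 G m n a b := by
  have main : ∀ K : Nat, (K : Int) ≤ m →
      pvShape m n ((PySem.List.pyRange 0 (K : Int)).foldl
        (fun g i => ((PySem.List.pyRange 0 n).foldl (pvRowStepA n i) (g, false, false)).1) G)
      ∧ ∀ a b, 0 ≤ a → 0 ≤ b →
        pvGGet ((PySem.List.pyRange 0 (K : Int)).foldl
          (fun g i => ((PySem.List.pyRange 0 n).foldl (pvRowStepA n i) (g, false, false)).1) G) a b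
        = if a < (K : Int) then pvXval (fun t => pvGGet G a t) n n b else pvGGet G a b := by
    intro K
    induction K with
    | zero =>
      intro _
      rw [Nat.cast_zero, PySem.List.pyRange_one_eq_nil (le_refl 0), List.foldl_nil]
      exact ⟨hG, fun a b ha hb => by rw [if_neg (by omega)]⟩
    | succ K ih =>
      intro hK
      have hK' : (K : Int) ≤ m := by push_cast at hK ⊢; omega
      have hKm : (K : Int) < m := by push_cast at hK; omega
      have hK0 : (0 : Int) ≤ (K : Int) := Int.natCast_nonneg K
      obtain ⟨hsh, hval⟩ := ih hK'
      rw [show ((K + 1 : Nat) : Int) = (K : Int) + 1 by push_cast; ring,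
          PySem.List.pyRange_one_succ_right (by omega), List.foldl_append,
          List.foldl_cons, List.foldl_nil]
      obtain ⟨gK, hgK⟩ : ∃ g, (PySem.List.pyRange 0 (K : Int)).foldl
          (fun g i => ((PySem.List.pyRange 0 n).foldl (pvRowStepA n i) (g, false, false)).1) G
          = g := ⟨_, rfl⟩
      rw [hgK] at hsh hval ⊢
      by_cases hn : 0 ≤ n
      · have hwr : ∀ (s : pvGridN m n) t t', 0 ≤ t → t < n → 0 ≤ t' →
            pvRdRow m n (K : Int) (pvWrRow m n (K : Int) s t) t'
              = if t' = t then 1 else pvRdRow m n (K : Int) s t' := by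
          intro s t t' h1 h2 h3
          show pvGGet (pvGSet s.val (K : Int) t 1) (K : Int) t' = _
          rw [pvGGet_gset m n (K : Int) t 1 (K : Int) t' s.val s.property hK0 hKm h1 h2 hK0 h3]
          by_cases e : t' = t
          · rw [if_pos ⟨rfl, e⟩, if_pos e]
          · rw [if_neg (by tauto), if_neg e]; rfl
        have hρ : ∀ (s : pvGridN m n) t, 0 ≤ t → t < n →
            (fun (a b : Int) => if a = (K : Int) ∨ a < 0 ∨ b < 0 then (0 : Int)
              else pvGGet (pvWrRow m n (K : Int) s t).val a b)
            = (fun (a b : Int) => if a = (K : Int) ∨ a < 0 ∨ b < 0 then (0 : Int)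
              else pvGGet s.val a b) := by
          intro s t h1 h2
          funext a b
          by_cases hc : a = (K : Int) ∨ a < 0 ∨ b < 0
          · rw [if_pos hc, if_pos hc]
          · rw [if_neg hc, if_neg hc]
            show pvGGet (pvGSet s.val (K : Int) t 1) a b = _
            rw [pvGGet_gset m n (K : Int) t 1 a b s.val s.property hK0 hKm h1 h2
                (by omega) (by omega), if_neg (by tauto)]
        obtain ⟨s, hfold, hreads, hrho⟩ := pvSweep_inv (pvRdRow m n (K : Int))
          (pvWrRow m n (K : Int))
          (fun s => fun (a b : Int) => if a = (K : Int) ∨ a < 0 ∨ b < 0 then (0 : Int)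
            else pvGGet s.val a b)
          n (⟨gK, hsh⟩ : pvGridN m n) hwr hρ n.toNat (by omega)
        rw [show ((n.toNat : Nat) : Int) = n by omega] at hfold hreads
        have hplain : ((PySem.List.pyRange 0 n).foldl (pvRowStepA n (K : Int))
            (gK, false, false)).1 = s.val := by
          have hb := pvRowBridge m n (K : Int) (PySem.List.pyRange 0 n)
            ((⟨gK, hsh⟩ : pvGridN m n), false, false)
          rw [hfold] at hb
          rw [← hb]
        rw [hplain]
        refine ⟨s.property, fun a b ha hb => ?_⟩
        by_cases haK : a = (K : Int)
        · subst haK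
          have hr := hreads b hb
          simp only [pvRdRow] at hr
          rw [hr, if_pos (by omega)]
          apply pvXval_congr _ _ n n b hb
          intro t ht'
          show pvGGet gK (K : Int) t = _
          rw [hval (K : Int) t hK0 ht', if_neg (by omega)]
        · have hro := congrFun (congrFun hrho a) b
          rw [if_neg (by omega), if_neg (by omega)] at hro
          rw [hro, hval a b ha hb]
          by_cases hlt : a < (K : Int)
          · rw [if_pos hlt, if_pos (by omega)]
          · rw [if_neg hlt, if_neg (by omega)]
      · rw [show PySem.List.pyRange 0 n = [] from PySem.List.pyRange_one_eq_nil (by omega),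
            List.foldl_nil]
        refine ⟨hsh, fun a b ha hb => ?_⟩
        show pvGGet gK a b = _
        rw [hval a b ha hb]
        by_cases haK : a = (K : Int)
        · subst haK
          rw [if_neg (by omega), if_pos (by omega), pvXval_deg _ _ _ (by omega) hb]
        · by_cases hlt : a < (K : Int)
          · rw [if_pos hlt, if_pos (by omega)]
          · rw [if_neg hlt, if_neg (by omega)]
  by_cases hm : 0 ≤ m
  · have h0 := main m.toNat (by omega)
    rw [show ((m.toNat : Nat) : Int) = m by omega] at h0
    obtain ⟨hsh, hval⟩ := h0
    refine ⟨hsh, fun a b ha hb => ?_⟩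
    rw [hval a b ha hb]
    unfold pvRow1
    by_cases hc : a < m
    · rw [if_pos hc, if_pos ⟨ha, hc⟩]
    · rw [if_neg hc, if_neg (by tauto)]
  · rw [show PySem.List.pyRange 0 m = [] from PySem.List.pyRange_one_eq_nil (by omega),
        List.foldl_nil]
    refine ⟨hG, fun a b ha hb => ?_⟩
    unfold pvRow1
    rw [if_neg (by omega)]

def pvRdCol (m n j : Int) (s : pvGridN m n) (t : Int) : Int := pvGGet s.val t j

def pvWrCol (m n j : Int) (s : pvGridN m n) (t : Int) : pvGridN m n :=
  ⟨pvGSet s.val t j 1, pvShape_gset m n t j 1 s.val s.property⟩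

lemma pvColBridge (m n j : Int) (l : List Int) (st : pvGridN m n × Bool × Bool) :
    ((l.foldl (pvSweepStep (pvRdCol m n j) (pvWrCol m n j) m) st).1.val,
     (l.foldl (pvSweepStep (pvRdCol m n j) (pvWrCol m n j) m) st).2)
      = l.foldl (pvColStepA m j) (st.1.val, st.2) := by
  induction l generalizing st with
  | nil => rfl
  | cons x l ihl =>
    have hinner : ∀ (s : pvGridN m n) (q : Int) (fl : Bool),
        ((pvHalf (pvRdCol m n j) (pvWrCol m n j) s q fl).1.val,
         (pvHalf (pvRdCol m n j) (pvWrCol m n j) s q fl).2)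
        = (if pvGGet s.val q j = 2 then (s.val, false)
           else if pvGGet s.val q j = 3 then (s.val, true)
           else if fl then (pvGSet s.val q j 1, fl) else (s.val, fl)) := by
      intro s q fl
      unfold pvHalf pvRdCol pvWrCol
      split_ifs <;> rfl
    have hstep : ((pvSweepStep (pvRdCol m n j) (pvWrCol m n j) m st x).1.val,
        (pvSweepStep (pvRdCol m n j) (pvWrCol m n j) m st x).2)
        = pvColStepA m j (st.1.val, st.2) x := by
      obtain ⟨s, pl, pr⟩ := st
      rw [pvSweepStep_eq]
      unfold pvColStepA
      dsimp only
      rw [← hinner s x pl]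
      dsimp only
      rw [← hinner (pvHalf (pvRdCol m n j) (pvWrCol m n j) s x pl).1 (m - x - 1) pr]
    rw [List.foldl_cons, List.foldl_cons,
        ihl (pvSweepStep (pvRdCol m n j) (pvWrCol m n j) m st x), hstep]

lemma pvColPhase (m n : Int) (g1 : List (List Int)) (h1 : pvShape m n g1) :
    ∀ a b, 0 ≤ a → 0 ≤ b →
      pvGGet ((PySem.List.pyRange 0 n).foldl
        (fun g j => ((PySem.List.pyRange 0 m).foldl (pvColStepA m j) (g, false, false)).1) g1) a b
      = if 0 ≤ b ∧ b < n then pvXval (fun t => pvGGet g1 t b) m m a else pvGGet g1 a b := by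
  have main : ∀ K : Nat, (K : Int) ≤ n →
      pvShape m n ((PySem.List.pyRange 0 (K : Int)).foldl
        (fun g j => ((PySem.List.pyRange 0 m).foldl (pvColStepA m j) (g, false, false)).1) g1)
      ∧ ∀ a b, 0 ≤ a → 0 ≤ b →
        pvGGet ((PySem.List.pyRange 0 (K : Int)).foldl
          (fun g j => ((PySem.List.pyRange 0 m).foldl (pvColStepA m j) (g, false, false)).1) g1) a b
        = if b < (K : Int) then pvXval (fun t => pvGGet g1 t b) m m a else pvGGet g1 a b := by
    intro K
    induction K with
    | zero =>
      intro _
      rw [Nat.cast_zero, PySem.List.pyRange_one_eq_nil (le_refl 0), List.foldl_nil]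
      exact ⟨h1, fun a b ha hb => by rw [if_neg (by omega)]⟩
    | succ K ih =>
      intro hK
      have hK' : (K : Int) ≤ n := by push_cast at hK ⊢; omega
      have hKn : (K : Int) < n := by push_cast at hK; omega
      have hK0 : (0 : Int) ≤ (K : Int) := Int.natCast_nonneg K
      obtain ⟨hsh, hval⟩ := ih hK'
      rw [show ((K + 1 : Nat) : Int) = (K : Int) + 1 by push_cast; ring,
          PySem.List.pyRange_one_succ_right (by omega), List.foldl_append,
          List.foldl_cons, List.foldl_nil]
      obtain ⟨gK, hgK⟩ : ∃ g, (PySem.List.pyRange 0 (K : Int)).foldl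
          (fun g j => ((PySem.List.pyRange 0 m).foldl (pvColStepA m j) (g, false, false)).1) g1
          = g := ⟨_, rfl⟩
      rw [hgK] at hsh hval ⊢
      by_cases hm : 0 ≤ m
      · have hwr : ∀ (s : pvGridN m n) t t', 0 ≤ t → t < m → 0 ≤ t' →
            pvRdCol m n (K : Int) (pvWrCol m n (K : Int) s t) t'
              = if t' = t then 1 else pvRdCol m n (K : Int) s t' := by
          intro s t t' ht1 ht2 ht3
          show pvGGet (pvGSet s.val t (K : Int) 1) t' (K : Int) = _
          rw [pvGGet_gset m n t (K : Int) 1 t' (K : Int) s.val s.property ht1 ht2 hK0 hKn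
              ht3 hK0]
          by_cases e : t' = t
          · rw [if_pos ⟨e, rfl⟩, if_pos e]
          · rw [if_neg (by tauto), if_neg e]; rfl
        have hρ : ∀ (s : pvGridN m n) t, 0 ≤ t → t < m →
            (fun (a b : Int) => if b = (K : Int) ∨ a < 0 ∨ b < 0 then (0 : Int)
              else pvGGet (pvWrCol m n (K : Int) s t).val a b)
            = (fun (a b : Int) => if b = (K : Int) ∨ a < 0 ∨ b < 0 then (0 : Int)
              else pvGGet s.val a b) := by
          intro s t ht1 ht2
          funext a b
          by_cases hc : b = (K : Int) ∨ a < 0 ∨ b < 0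
          · rw [if_pos hc, if_pos hc]
          · rw [if_neg hc, if_neg hc]
            show pvGGet (pvGSet s.val t (K : Int) 1) a b = _
            rw [pvGGet_gset m n t (K : Int) 1 a b s.val s.property ht1 ht2 hK0 hKn
                (by omega) (by omega), if_neg (by tauto)]
        obtain ⟨s, hfold, hreads, hrho⟩ := pvSweep_inv (pvRdCol m n (K : Int))
          (pvWrCol m n (K : Int))
          (fun s => fun (a b : Int) => if b = (K : Int) ∨ a < 0 ∨ b < 0 then (0 : Int)
            else pvGGet s.val a b)
          m (⟨gK, hsh⟩ : pvGridN m n) hwr hρ m.toNat (by omega)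
        rw [show ((m.toNat : Nat) : Int) = m by omega] at hfold hreads
        have hplain : ((PySem.List.pyRange 0 m).foldl (pvColStepA m (K : Int))
            (gK, false, false)).1 = s.val := by
          have hb := pvColBridge m n (K : Int) (PySem.List.pyRange 0 m)
            ((⟨gK, hsh⟩ : pvGridN m n), false, false)
          rw [hfold] at hb
          rw [← hb]
        rw [hplain]
        refine ⟨s.property, fun a b ha hb => ?_⟩
        by_cases hbK : b = (K : Int)
        · subst hbK
          have hr := hreads a ha
          show pvGGet s.val a (K : Int) = _
          rw [show pvGGet s.val a (K : Int) = pvRdCol m n (K : Int) s a from rfl, hr,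
              if_pos (by omega)]
          apply pvXval_congr _ _ m m a ha
          intro t ht'
          show pvGGet gK t (K : Int) = _
          rw [hval t (K : Int) ht' hK0, if_neg (by omega)]
        · have hro := congrFun (congrFun hrho a) b
          rw [if_neg (by omega), if_neg (by omega)] at hro
          rw [hro, hval a b ha hb]
          by_cases hlt : b < (K : Int)
          · rw [if_pos hlt, if_pos (by omega)]
          · rw [if_neg hlt, if_neg (by omega)]
      · rw [show PySem.List.pyRange 0 m = [] from PySem.List.pyRange_one_eq_nil (by omega),
            List.foldl_nil]
        refine ⟨hsh, fun a b ha hb => ?_⟩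
        show pvGGet gK a b = _
        rw [hval a b ha hb]
        by_cases hbK : b = (K : Int)
        · subst hbK
          rw [if_neg (by omega), if_pos (by omega), pvXval_deg _ _ _ (by omega) ha]
        · by_cases hlt : b < (K : Int)
          · rw [if_pos hlt, if_pos (by omega)]
          · rw [if_neg hlt, if_neg (by omega)]
  intro a b ha hb
  by_cases hn : 0 ≤ n
  · have h0 := main n.toNat (by omega)
    rw [show ((n.toNat : Nat) : Int) = n by omega] at h0
    obtain ⟨hsh, hval⟩ := h0
    rw [hval a b ha hb]
    by_cases hc : b < n
    · rw [if_pos hc, if_pos ⟨hb, hc⟩]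
    · rw [if_neg hc, if_neg (by tauto)]
  · rw [show PySem.List.pyRange 0 n = [] from PySem.List.pyRange_one_eq_nil (by omega),
        List.foldl_nil, if_neg (by omega)]

-- ===== B's rays compute the same scans =====
lemma pvRayE (G : List (List Int)) (m n i y : Int) (fuel : Nat)
    (hi : 0 ≤ i) (him : i < m) (hy : 0 ≤ y) (hf : (n - y).toNat ≤ fuel) :
    pvRay G m n fuel i y 0 1 = pvFwd (fun t => pvGGet G i t) y n := by
  induction fuel generalizing y with
  | zero =>
    rw [pvFwd_nil _ _ _ (by omega)]; rfl
  | succ fuel ih =>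
    by_cases hyn : y < n
    · simp only [pvRay]
      rw [if_pos ⟨hi, him, hy, hyn⟩, pvFwd_cons _ _ _ hyn]
      by_cases h3 : pvGGet G i y = 3
      · rw [if_pos h3, if_neg (by omega), if_pos h3]
      · rw [if_neg h3]
        by_cases h2 : pvGGet G i y = 2
        · rw [if_pos h2, if_pos h2]
        · rw [if_neg h2, if_neg h2, if_neg h3, show i + (0 : Int) = i by ring]
          exact ih (y + 1) (by omega) (by omega)
    · simp only [pvRay]
      rw [if_neg (by tauto), pvFwd_nil _ _ _ (by omega)]

lemma pvRayW (G : List (List Int)) (m n i y : Int) (fuel : Nat)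
    (hi : 0 ≤ i) (him : i < m) (hy : y < n) (hf : (y + 1).toNat ≤ fuel) :
    pvRay G m n fuel i y 0 (-1) = pvBwd (fun t => pvGGet G i t) 0 (y + 1) := by
  induction fuel generalizing y with
  | zero =>
    rw [pvBwd_nil _ _ _ (by omega)]; rfl
  | succ fuel ih =>
    by_cases hy0 : 0 ≤ y
    · simp only [pvRay]
      rw [if_pos ⟨hi, him, hy0, hy⟩, pvBwd_peel _ _ _ (by omega),
          show y + 1 - 1 = y by ring]
      by_cases h3 : pvGGet G i y = 3
      · rw [if_pos h3, if_neg (by omega), if_pos h3]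
      · rw [if_neg h3]
        by_cases h2 : pvGGet G i y = 2
        · rw [if_pos h2, if_pos h2]
        · rw [if_neg h2, if_neg h2, if_neg h3, show i + (0 : Int) = i by ring,
              show y + (-1 : Int) = y - 1 by ring]
          have := ih (y - 1) (by omega) (by omega)
          rw [show y - 1 + 1 = y by ring] at this
          exact this
    · simp only [pvRay]
      rw [if_neg (by tauto), pvBwd_nil _ _ _ (by omega)]

lemma pvRayS (G : List (List Int)) (m n j x : Int) (fuel : Nat)
    (hj : 0 ≤ j) (hjn : j < n) (hx : 0 ≤ x) (hf : (m - x).toNat ≤ fuel) :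
    pvRay G m n fuel x j 1 0 = pvFwd (fun t => pvGGet G t j) x m := by
  induction fuel generalizing x with
  | zero =>
    rw [pvFwd_nil _ _ _ (by omega)]; rfl
  | succ fuel ih =>
    by_cases hxm : x < m
    · simp only [pvRay]
      rw [if_pos ⟨hx, hxm, hj, hjn⟩, pvFwd_cons _ _ _ hxm]
      by_cases h3 : pvGGet G x j = 3
      · rw [if_pos h3, if_neg (by omega), if_pos h3]
      · rw [if_neg h3]
        by_cases h2 : pvGGet G x j = 2
        · rw [if_pos h2, if_pos h2]
        · rw [if_neg h2, if_neg h2, if_neg h3, show j + (0 : Int) = j by ring]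
          exact ih (x + 1) (by omega) (by omega)
    · simp only [pvRay]
      rw [if_neg (by tauto), pvFwd_nil _ _ _ (by omega)]

lemma pvRayN (G : List (List Int)) (m n j x : Int) (fuel : Nat)
    (hj : 0 ≤ j) (hjn : j < n) (hx : x < m) (hf : (x + 1).toNat ≤ fuel) :
    pvRay G m n fuel x j (-1) 0 = pvBwd (fun t => pvGGet G t j) 0 (x + 1) := by
  induction fuel generalizing x with
  | zero =>
    rw [pvBwd_nil _ _ _ (by omega)]; rfl
  | succ fuel ih =>
    by_cases hx0 : 0 ≤ x
    · simp only [pvRay]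
      rw [if_pos ⟨hx0, hx, hj, hjn⟩, pvBwd_peel _ _ _ (by omega),
          show x + 1 - 1 = x by ring]
      by_cases h3 : pvGGet G x j = 3
      · rw [if_pos h3, if_neg (by omega), if_pos h3]
      · rw [if_neg h3]
        by_cases h2 : pvGGet G x j = 2
        · rw [if_pos h2, if_pos h2]
        · rw [if_neg h2, if_neg h2, if_neg h3, show j + (0 : Int) = j by ring,
              show x + (-1 : Int) = x - 1 by ring]
          have := ih (x - 1) (by omega) (by omega)
          rw [show x - 1 + 1 = x by ring] at this
          exact this
    · simp only [pvRay]
      rw [if_neg (by tauto), pvBwd_nil _ _ _ (by omega)]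

-- ===== per-cell agreement and the final theorem =====
lemma pvXval_full (v : Int → Int) (n j : Int) (hj : 0 ≤ j) (hjn : j < n)
    (hsp : ¬(v j = 2 ∨ v j = 3)) :
    pvXval v n n j = if pvBwd v 0 j = true ∨ pvFwd v (j + 1) n = true then 1 else v j := by
  unfold pvXval
  rw [if_neg hsp]
  by_cases hc : pvBwd v 0 j = true ∨ pvFwd v (j + 1) n = true
  · rw [if_pos hc, if_pos]
    rcases hc with h | h
    · exact Or.inl ⟨hj, hjn, h⟩
    · exact Or.inr ⟨by omega, hjn, h⟩
  · rw [if_neg hc, if_neg]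
    rintro (⟨_, _, h⟩ | ⟨_, _, h⟩)
    · exact hc (Or.inl h)
    · exact hc (Or.inr h)

lemma pvCell (m n : Int) (G : List (List Int)) (_hG : pvShape m n G) (i j : Int)
    (hi : 0 ≤ i) (him : i < m) (hj : 0 ≤ j) (hjn : j < n) :
    (pvXval (fun t => pvRow1 G m n t j) m m i = 0)
      ↔ (pvGGet G i j = 0 ∧ pvSeen G m n i j = false) := by
  have hseen : pvSeen G m n i j
      = (pvFwd (fun t => pvGGet G i t) (j + 1) n || pvBwd (fun t => pvGGet G i t) 0 j
         || pvFwd (fun t => pvGGet G t j) (i + 1) m || pvBwd (fun t => pvGGet G t j) 0 i) := by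
    unfold pvSeen
    rw [pvRayE G m n i (j + 1) _ hi him (by omega) (by omega),
        pvRayW G m n i (j - 1) _ hi him (by omega) (by omega),
        pvRayS G m n j (i + 1) _ hj hjn (by omega) (by omega),
        pvRayN G m n j (i - 1) _ hj hjn (by omega) (by omega),
        show j - 1 + 1 = j by ring, show i - 1 + 1 = i by ring]
  have hsp1 : ∀ t, 0 ≤ t →
      ((pvRow1 G m n t j = 2 ↔ pvGGet G t j = 2) ∧ (pvRow1 G m n t j = 3 ↔ pvGGet G t j = 3)) := by
    intro t ht
    unfold pvRow1
    by_cases hc : 0 ≤ t ∧ t < m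
    · rw [if_pos hc]; exact pvXval_special _ n n j
    · rw [if_neg hc]; exact ⟨Iff.rfl, Iff.rfl⟩
  have hbcol : pvBwd (fun t => pvRow1 G m n t j) 0 i = pvBwd (fun t => pvGGet G t j) 0 i :=
    pvBwd_congr _ _ 0 i (fun s h1 h2 => hsp1 s h1)
  have hfcol : pvFwd (fun t => pvRow1 G m n t j) (i + 1) m
      = pvFwd (fun t => pvGGet G t j) (i + 1) m :=
    pvFwd_congr _ _ (i + 1) m (fun s h1 h2 => hsp1 s (by omega))
  have hw : pvRow1 G m n i j = pvXval (fun t => pvGGet G i t) n n j := by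
    unfold pvRow1; rw [if_pos ⟨hi, him⟩]
  rw [hseen]
  by_cases hsp : pvGGet G i j = 2 ∨ pvGGet G i j = 3
  · have hspw : pvXval (fun t => pvRow1 G m n t j) m m i = pvRow1 G m n i j ∧
        (pvRow1 G m n i j = 2 ∨ pvRow1 G m n i j = 3) := by
      have hor : pvRow1 G m n i j = 2 ∨ pvRow1 G m n i j = 3 := by
        rcases hsp with h | h
        · exact Or.inl ((hsp1 i hi).1.mpr h)
        · exact Or.inr ((hsp1 i hi).2.mpr h)
      exact ⟨by unfold pvXval; rw [if_pos hor], hor⟩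
    rw [hspw.1]
    constructor
    · intro h0; exfalso; rcases hspw.2 with h | h <;> omega
    · rintro ⟨h0, _⟩; exfalso; rcases hsp with h | h <;> omega
  · have hspw : ¬(pvRow1 G m n i j = 2 ∨ pvRow1 G m n i j = 3) := by
      rintro (h | h)
      · exact hsp (Or.inl ((hsp1 i hi).1.mp h))
      · exact hsp (Or.inr ((hsp1 i hi).2.mp h))
    have houter := pvXval_full (fun t => pvRow1 G m n t j) m i hi him hspw
    rw [houter, hbcol, hfcol]
    dsimp only
    rw [hw, pvXval_full (fun t => pvGGet G i t) n j hj hjn hsp]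
    cases hB1 : pvBwd (fun t => pvGGet G i t) 0 j <;>
      cases hB2 : pvFwd (fun t => pvGGet G i t) (j + 1) n <;>
        cases hB3 : pvBwd (fun t => pvGGet G t j) 0 i <;>
          cases hB4 : pvFwd (fun t => pvGGet G t j) (i + 1) m <;>
            simp_all

-- ===== VERDICT =====
theorem countUnguarded_spec : Claim_equal_countUnguarded := by
  intro m n guards walls _ _
  unfold Spec_countUnguarded countUnguarded countUnguarded_alt
  dsimp only
  obtain ⟨hsh1, hval1⟩ := pvRowPhase m n (pvBuild m n guards walls)
    (pvShape_build m n guards walls)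
  obtain ⟨g1, hg1⟩ : ∃ g, (PySem.List.pyRange 0 m).foldl
      (fun g i => ((PySem.List.pyRange 0 n).foldl (pvRowStepA n i) (g, false, false)).1)
      (pvBuild m n guards walls) = g := ⟨_, rfl⟩
  rw [hg1] at hsh1 hval1 ⊢
  have hcol := pvColPhase m n g1 hsh1
  obtain ⟨g2, hg2⟩ : ∃ g, (PySem.List.pyRange 0 n).foldl
      (fun g j => ((PySem.List.pyRange 0 m).foldl (pvColStepA m j) (g, false, false)).1) g1
      = g := ⟨_, rfl⟩
  rw [hg2] at hcol ⊢
  apply PySem.List.foldl_congr_mem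
  intro res i hi
  obtain ⟨hi0, him⟩ := PySem.List.mem_pyRange_one.mp hi
  apply PySem.List.foldl_congr_mem
  intro res' j hj
  obtain ⟨hj0, hjn⟩ := PySem.List.mem_pyRange_one.mp hj
  have hcell : pvGGet g2 i j = 0
      ↔ (pvGGet (pvBuild m n guards walls) i j = 0
         ∧ pvSeen (pvBuild m n guards walls) m n i j = false) := by
    rw [hcol i j hi0 hj0, if_pos ⟨hj0, hjn⟩]
    have hline : pvXval (fun t => pvGGet g1 t j) m m i
        = pvXval (fun t => pvRow1 (pvBuild m n guards walls) m n t j) m m i :=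
      pvXval_congr _ _ m m i hi0 (fun t ht => hval1 t j ht hj0)
    rw [hline]
    exact pvCell m n (pvBuild m n guards walls) (pvShape_build m n guards walls) i j
      hi0 him hj0 hjn
  by_cases hz : pvGGet g2 i j = 0
  · rw [if_pos hz, if_pos (hcell.mp hz)]
  · rw [if_neg hz, if_neg (fun hh => hz (hcell.mpr hh))]
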